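-- pv_equiv track=rewrite | github.com/Soojin-Lee-01/Algorithm-Study | Programmers/폰켓몬/폰켓몬.py | solution
-- ===== SOURCE A (Python) =====
-- def solution(nums):
--     result = []
--     for i in nums:
--         if len(result) < len(nums) / 2:
--             if i in result:
--                 pass
--             else:
--                 result.append(i)
--
--     answer = len(result)
--     return answer
-- ===== SOURCE B (Python) =====
-- def solution(nums):
--     s = sorted(nums)
--     distinct = 1 if s else 0
--     for x, y in zip(s, s[1:]):
--         if x != y:
--             distinct += 1
--     # A's cap is len(result) < len(nums)/2 on a float, i.e. ceil(len/2)
--     return min(distinct, (len(nums) + 1) // 2)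
-- ===== Notes on version B (the rewrite author's own statement) =====
-- stated objective: alternative
-- what changed: Replaces A's capped first-occurrence list with repeated linear membership scans by sorted(nums) plus one adjacent-comparison pass counting distinct values, capped by (len+1)//2 (A's float n/2 boundary, i.e. ceil).
import Mathlib
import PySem

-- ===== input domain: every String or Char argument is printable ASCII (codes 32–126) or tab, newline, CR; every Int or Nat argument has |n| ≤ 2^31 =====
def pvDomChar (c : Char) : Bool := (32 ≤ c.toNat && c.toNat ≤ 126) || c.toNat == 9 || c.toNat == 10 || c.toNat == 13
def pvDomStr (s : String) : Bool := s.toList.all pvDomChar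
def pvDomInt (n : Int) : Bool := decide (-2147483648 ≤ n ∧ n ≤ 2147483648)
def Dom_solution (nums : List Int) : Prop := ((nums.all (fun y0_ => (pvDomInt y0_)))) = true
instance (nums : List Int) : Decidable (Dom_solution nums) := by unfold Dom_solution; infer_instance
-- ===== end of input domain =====

-- B replaces A's capped first-occurrence accumulation (linear membership scan per element)
-- by sort + one adjacent-comparison pass; objective: alternative (O(n log n) vs O(n^2) scans).

-- ===== PORT A =====
-- `len(result) < len(nums)/2` compares an int with the float n/2; for list lengths this is
-- exactly `2*len(result) < len(nums)`, ported as such (exact on all list lengths here).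
def solution (nums : List Int) : Int :=
  let result :=
    nums.foldl (fun result i =>
      if (result.length : Int) * 2 < (nums.length : Int) then
        if i ∈ result then result else result ++ [i]
      else result) []
  (result.length : Int)

-- ===== PORT B =====
-- s[1:] ported as `s.drop 1` (exact for slice [1:]); zip pairs, then min with (n+1)//2.
def solution_alt (nums : List Int) : Int :=
  let s := PySem.List.sorted nums (fun x => x) false
  let distinct : Int :=
    (s.zip (s.drop 1)).foldl
      (fun d p => if p.1 ≠ p.2 then d + 1 else d)
      (if s = [] then 0 else 1)
  min distinct (PySem.Int.floordiv ((nums.length : Int) + 1) 2)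

-- ===== PRECONDITION & SPEC =====
def Spec_solution (nums : List Int) (out : Int) : Prop := out = solution_alt nums
instance (nums : List Int) (out : Int) : Decidable (Spec_solution nums out) := by unfold Spec_solution; infer_instance

-- ===== CLAIM (what is proved, stated in full; the proofs are below) =====
def Claim_equal_solution : Prop := ∀ (nums : List Int), Dom_solution nums → Spec_solution nums (solution nums)

-- ===== LEMMAS AND PROOFS =====

-- uncapped first-occurrence dedup fold
def foldD (xs : List Int) (d : List Int) : List Int :=
  xs.foldl (fun d i => if i ∈ d then d else d ++ [i]) d

theorem foldD_nodup (xs : List Int) (d : List Int) (hd : d.Nodup) : (foldD xs d).Nodup := by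
  induction xs generalizing d with
  | nil => exact hd
  | cons x xs ih =>
    simp only [foldD, List.foldl_cons]
    by_cases hx : x ∈ d
    · simpa [hx] using ih d hd
    · simpa [hx] using ih (d ++ [x])
        (by simp [List.nodup_append, hd]; exact fun a ha h => hx (h ▸ ha))

theorem mem_foldD (xs : List Int) (d : List Int) (y : Int) :
    y ∈ foldD xs d ↔ y ∈ d ∨ y ∈ xs := by
  induction xs generalizing d with
  | nil => simp [foldD]
  | cons x xs ih =>
    simp only [foldD, List.foldl_cons]
    by_cases hx : x ∈ d
    · simp only [hx, if_pos]
      rw [show (List.foldl (fun d i => if i ∈ d then d else d ++ [i]) d xs) = foldD xs d from rfl, ih]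
      constructor
      · rintro (h | h) <;> simp [h]
      · rintro (h | h)
        · exact Or.inl h
        · rcases List.mem_cons.mp h with h | h
          · exact Or.inl (h ▸ hx)
          · exact Or.inr h
    · simp only [hx, if_neg, not_false_iff]
      rw [show (List.foldl (fun d i => if i ∈ d then d else d ++ [i]) (d ++ [x]) xs) = foldD xs (d ++ [x]) from rfl, ih]
      simp only [List.mem_append, List.mem_cons, or_assoc]
      tauto

-- A's capped fold equals the uncapped dedup fold truncated at cap = (n+1)/2
theorem foldA_eq_take (n : Nat) (xs : List Int) (d : List Int) :
    xs.foldl (fun r i =>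
      if (r.length : Int) * 2 < (n : Int) then
        if i ∈ r then r else r ++ [i]
      else r) (d.take ((n + 1) / 2)) = (foldD xs d).take ((n + 1) / 2) := by
  induction xs generalizing d with
  | nil => rfl
  | cons x xs ih =>
    simp only [List.foldl_cons, foldD]
    by_cases hlt : d.length < (n + 1) / 2
    · have htake : d.take ((n + 1) / 2) = d := List.take_of_length_le (by omega)
      have hcond : ((d.length : Int)) * 2 < (n : Int) := by omega
      rw [htake, if_pos hcond]
      by_cases hx : x ∈ d
      · rw [if_pos hx]
        have h2 := ih d
        rw [htake] at h2
        exact h2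
      · rw [if_neg hx]
        have h2 := ih (d ++ [x])
        rw [List.take_of_length_le (by simp [List.length_append]; omega)] at h2
        exact h2
    · have hcond : ¬ (((d.take ((n + 1) / 2)).length : Int) * 2 < (n : Int)) := by
        simp only [List.length_take]
        push_cast; omega
      rw [if_neg hcond]
      by_cases hx : x ∈ d
      · rw [if_pos hx]; exact ih d
      · rw [if_neg hx]
        have : (d ++ [x]).take ((n + 1) / 2) = d.take ((n + 1) / 2) :=
          List.take_append_of_le_length (by omega)
        rw [← this]
        exact ih (d ++ [x])

-- adjacent-difference count of a ≤-sorted list = number of distinct values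
theorem adj_count_sorted (s : List Int) (hs : s.Pairwise (· ≤ ·)) :
    (if s = [] then 0 else 1) + (s.zip (s.drop 1)).countP (fun p => decide ¬ (p.1 = p.2))
      = s.toFinset.card := by
  induction s with
  | nil => simp
  | cons x t ih =>
    cases t with
    | nil => simp
    | cons y t' =>
      have hpw : (y :: t').Pairwise (· ≤ ·) := hs.tail
      have hxy : x ≤ y := (List.pairwise_cons.mp hs).1 y (by simp)
      have hxt : ∀ z ∈ t', x ≤ z := fun z hz => (List.pairwise_cons.mp hs).1 z (by simp [hz])
      have hyt : ∀ z ∈ t', y ≤ z := fun z hz => (List.pairwise_cons.mp hpw).1 z hz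
      have ih' := ih hpw
      simp only [List.drop_one, List.tail_cons] at ih' ⊢
      rw [show (x :: y :: t').zip (y :: t') = (x, y) :: ((y :: t').zip t') from rfl]
      rw [List.countP_cons]
      by_cases hxy' : x = y
      · subst hxy'
        have : (x :: x :: t').toFinset = (x :: t').toFinset := by simp
        rw [this, ← ih']
        simp [List.zip]
      · have hxnot : x ∉ (y :: t').toFinset := by
          simp only [List.mem_toFinset, List.mem_cons]
          rintro (h | h)
          · exact hxy' h
          · exact hxy' (le_antisymm hxy (hyt x h))
        have hcard : (x :: y :: t').toFinset.card = (y :: t').toFinset.card + 1 := by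
          simp only [List.toFinset_cons]
          rw [Finset.card_insert_of_notMem (by simpa using hxnot)]
        rw [hcard, ← ih']
        simp [hxy']
        omega

-- Int fold with conditional +1 = initial + countP
theorem foldl_count_int (l : List (Int × Int)) (a : Int) :
    l.foldl (fun d p => if p.1 ≠ p.2 then d + 1 else d) a
      = a + (l.countP (fun p => decide ¬ (p.1 = p.2)) : Nat) := by
  induction l generalizing a with
  | nil => simp
  | cons p l ih =>
    simp only [List.foldl_cons, List.countP_cons]
    by_cases h : p.1 = p.2
    · rw [if_neg (not_not_intro h), ih]
      simp [h]
    · rw [if_pos h, ih]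
      simp [h]
      ring

-- ===== VERDICT (by name: the statement is the Claim_ definition above) =====
theorem solution_spec : Claim_equal_solution := by
  intro nums _
  unfold Spec_solution solution solution_alt
  set n := nums.length with hn
  -- A's value
  have hA := foldA_eq_take n nums []
  simp only [List.take_nil] at hA
  rw [hA]
  dsimp only
  rw [List.length_take]
  -- distinct count on each side equals toFinset.card
  have hDlen : (foldD nums []).length = nums.toFinset.card := by
    have hnd := foldD_nodup nums [] (by simp)
    have hmem : ∀ y, y ∈ foldD nums [] ↔ y ∈ nums := by
      intro y; rw [mem_foldD]; simp
    have : (foldD nums []).toFinset = nums.toFinset := by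
      ext y; simp [hmem y]
    rw [← this, List.toFinset_card_of_nodup hnd]
  set s := PySem.List.sorted nums (fun x => x) false with hsdef
  have hperm : s.Perm nums := PySem.List.sorted_perm nums (fun x => x) false
  have hsf : s.toFinset = nums.toFinset := by
    ext y; simp [hperm.mem_iff]
  have hpw : s.Pairwise (· ≤ ·) := by
    simpa using PySem.List.sorted_pairwise (xs := nums) (key := fun x => x)
  have hadj := adj_count_sorted s hpw
  rw [hsf] at hadj
  rw [foldl_count_int]
  -- cap arithmetic
  have hcap : PySem.Int.floordiv ((n : Int) + 1) 2 = (((n + 1) / 2 : Nat) : Int) := by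
    rw [show ((n : Int) + 1) = ((n + 1 : Nat) : Int) by push_cast; ring]
    exact_mod_cast PySem.Int.floordiv_natCast (n + 1) 2
  rw [hcap]
  rcases eq_or_ne s [] with hnil | hnnil
  · have : nums = [] := by
      have := hperm; rw [hnil] at this; exact (List.Perm.nil_eq this).symm
    subst this
    simp [hnil, foldD]
  · have h1 : (if s = [] then (0 : Int) else 1) = 1 := by simp [hnnil]
    rw [h1] at *
    have : (1 : Int) + ((s.zip (s.drop 1)).countP (fun p => decide ¬ (p.1 = p.2)) : Nat)
        = (nums.toFinset.card : Int) := by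
      have := hadj
      rw [if_neg hnnil] at this
      push_cast [← this]
      ring
    rw [this, ← hDlen]
    push_cast
    omega
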